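-- pv_equiv track=rewrite | github.com/koteitan/repeated-maze | tools/hs2maze/hs2maze.py | build_block_sets
-- ===== SOURCE A (Python) =====
-- def decompose_atomic(pc_src, dx, dy, pc_dst):
--     """Return (src_port, dst_port_or_None) per the (*1) mapping.
--     Each port is a tuple (s_dir, s_idx, d_dir, d_idx).
--     For (0, 0) the single intra-block port `Ca-Cb` is returned with
--     dst_port = None."""
--     if dx == 0 and dy == 0:
--         return (('C', pc_src, 'C', pc_dst), None)
--     if (dx, dy) == (-1, 0):
--         return (('C', pc_src, 'W', pc_dst), ('E', pc_dst, 'C', pc_dst))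
--     if (dx, dy) == (1, 0):
--         return (('C', pc_src, 'E', pc_dst), ('W', pc_dst, 'C', pc_dst))
--     if (dx, dy) == (0, -1):
--         return (('C', pc_src, 'S', pc_dst), ('N', pc_dst, 'C', pc_dst))
--     if (dx, dy) == (0, 1):
--         return (('C', pc_src, 'N', pc_dst), ('S', pc_dst, 'C', pc_dst))
--     raise ValueError(
--         f"unsupported displacement (dx={dx}, dy={dy}); "
--         "only single-axis unit steps are supported"
--     )
--
-- def build_block_sets(rules):
--     """Distribute (*1)-decomposed ports across four block-type sets:
--         normal -- (X >= 1, Y >= 1)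
--         nx     -- (X = 0,  Y >= 1)
--         ny     -- (X >= 1, Y = 0)
--         zero   -- (X = 0,  Y = 0)
--     Catch-all rules (zb=None) fire regardless of X / Y, so they go
--     to all four sets.  zb='x' (X=0 literal) fires at X=0 -> nx + zero.
--     zb='y' (Y=0 literal) fires at Y=0 -> ny + zero."""
--     sets = {'normal': [], 'nx': [], 'ny': [], 'zero': []}
--     for pc_src, dx, dy, pc_dst, zb in rules:
--         src_port, dst_port = decompose_atomic(pc_src, dx, dy, pc_dst)
--         if zb is None:
--             targets = ('normal', 'nx', 'ny', 'zero')
--         elif zb == 'x':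
--             targets = ('nx', 'zero')
--         else:
--             targets = ('ny', 'zero')
--         for bt in targets:
--             sets[bt].append(src_port)
--             if dst_port is not None:
--                 sets[bt].append(dst_port)
--     return sets
-- ===== SOURCE B (Python) =====
-- _TABLE = {(-1, 0): ('W', 'E'), (1, 0): ('E', 'W'),
--           (0, -1): ('S', 'N'), (0, 1): ('N', 'S')}
--
-- def _flat_ports(pc_src, dx, dy, pc_dst):
--     """Flat list of ports for one rule (1 port for (0,0), else 2)."""
--     if dx == 0 and dy == 0:
--         return [('C', pc_src, 'C', pc_dst)]
--     try:
--         a, b = _TABLE[(dx, dy)]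
--     except KeyError:
--         raise ValueError(
--             f"unsupported displacement (dx={dx}, dy={dy}); "
--             "only single-axis unit steps are supported"
--         )
--     return [('C', pc_src, a, pc_dst), (b, pc_dst, 'C', pc_dst)]
--
-- def build_block_sets(rules):
--     # Phase 1: decompose all rules in order (first bad rule raises here).
--     entries = [(zb, _flat_ports(p, dx, dy, q)) for p, dx, dy, q, zb in rules]
--     # Phase 2: one filtered concatenation per block type.
--     accept = {'normal': lambda zb: zb is None,
--               'nx':     lambda zb: zb is None or zb == 'x',
--               'ny':     lambda zb: zb is None or zb != 'x',
--               'zero':   lambda zb: True}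
--     return {bt: [port for zb, ports in entries if acc(zb) for port in ports]
--             for bt, acc in accept.items()}
-- ===== Notes on version B (the rewrite author's own statement) =====
-- stated objective: alternative
-- what changed: B splits the work into two phases: it first decomposes every rule once into a flat port list paired with its zb tag, then builds each of the four block-type lists independently by a filtered concatenation over that entry list, replacing A's per-rule dispatch that appends into four mutable lists.
import Mathlib
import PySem

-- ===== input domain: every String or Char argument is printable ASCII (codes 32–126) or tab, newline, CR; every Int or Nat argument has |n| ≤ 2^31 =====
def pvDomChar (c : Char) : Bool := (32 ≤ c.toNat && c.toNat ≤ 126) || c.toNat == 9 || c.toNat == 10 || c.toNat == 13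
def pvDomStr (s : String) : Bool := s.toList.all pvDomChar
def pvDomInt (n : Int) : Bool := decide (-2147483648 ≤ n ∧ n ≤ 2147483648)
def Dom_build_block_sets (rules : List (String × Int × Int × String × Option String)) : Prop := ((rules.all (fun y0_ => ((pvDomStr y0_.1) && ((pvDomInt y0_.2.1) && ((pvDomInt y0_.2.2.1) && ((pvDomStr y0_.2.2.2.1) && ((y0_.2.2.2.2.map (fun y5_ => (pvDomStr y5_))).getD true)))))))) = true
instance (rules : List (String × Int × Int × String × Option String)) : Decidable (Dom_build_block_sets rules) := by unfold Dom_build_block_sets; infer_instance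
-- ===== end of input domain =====

-- One honest line: B decomposes all rules up front into (zb, flat ports) entries and then
-- builds each block-type list by one filtered concatenation, instead of A's per-rule dispatch
-- appending into four mutable lists; objective: alternative decomposition, same cost.

-- ===== PORT A =====
-- decompose_atomic; 'none' models the ValueError branch (excluded by Pre_).
def decompose_atomic (pc_src : String) (dx dy : Int) (pc_dst : String) :
    Option ((String × String × String × String) × Option (String × String × String × String)) :=
  if dx = 0 ∧ dy = 0 then some (("C", pc_src, "C", pc_dst), none)
  else if dx = -1 ∧ dy = 0 then some (("C", pc_src, "W", pc_dst), some ("E", pc_dst, "C", pc_dst))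
  else if dx = 1 ∧ dy = 0 then some (("C", pc_src, "E", pc_dst), some ("W", pc_dst, "C", pc_dst))
  else if dx = 0 ∧ dy = -1 then some (("C", pc_src, "S", pc_dst), some ("N", pc_dst, "C", pc_dst))
  else if dx = 0 ∧ dy = 1 then some (("C", pc_src, "N", pc_dst), some ("S", pc_dst, "C", pc_dst))
  else none

-- A's loop: the four lists of the dict 'sets' are the state; 'append src_port, then dst_port
-- if not None' per target set.  On the ValueError branch the state so far is returned
-- (unreachable under Pre_).
def buildLoopA (rules : List (String × Int × Int × String × Option String))
    (n x y z : List (String × String × String × String)) :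
    List (String × List (String × String × String × String)) :=
  match rules with
  | [] => [("normal", n), ("nx", x), ("ny", y), ("zero", z)]
  | (s, dx, dy, d, zb) :: rs =>
    match decompose_atomic s dx dy d with
    | none => [("normal", n), ("nx", x), ("ny", y), ("zero", z)]
    | some (sp, dp) =>
      let add := fun (l : List (String × String × String × String)) =>
        (l ++ [sp]) ++ (match dp with | none => [] | some p => [p])
      match zb with
      | none => buildLoopA rs (add n) (add x) (add y) (add z)
      | some t => if t = "x" then buildLoopA rs n (add x) y (add z)
                  else buildLoopA rs n x (add y) (add z)

def build_block_sets (rules : List (String × Int × Int × String × Option String)) :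
    List (String × List (String × String × String × String)) :=
  buildLoopA rules [] [] [] []

-- ===== PORT B =====
-- _flat_ports: the direction table is an association list looked up by (dx, dy);
-- 'none' models the ValueError (excluded by Pre_).
def flat_ports (pc_src : String) (dx dy : Int) (pc_dst : String) :
    Option (List (String × String × String × String)) :=
  if dx = 0 ∧ dy = 0 then some [("C", pc_src, "C", pc_dst)]
  else
    match ([((-1, 0), ("W", "E")), ((1, 0), ("E", "W")),
            ((0, -1), ("S", "N")), ((0, 1), ("N", "S"))] :
           List ((Int × Int) × (String × String))).lookup (dx, dy) with
    | none => none
    | some (a, b) => some [("C", pc_src, a, pc_dst), (b, pc_dst, "C", pc_dst)]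

-- Phase 1: decompose every rule in order (a bad rule raises in Python; here the
-- entry list is cut off there — unreachable under Pre_).
def entriesB (rules : List (String × Int × Int × String × Option String)) :
    List (Option String × List (String × String × String × String)) :=
  match rules with
  | [] => []
  | (s, dx, dy, d, zb) :: rs =>
    match flat_ports s dx dy d with
    | none => []
    | some fp => (zb, fp) :: entriesB rs

-- Phase 2: one filtered concatenation per block type.
def selB (p : Option String → Bool) (rules : List (String × Int × Int × String × Option String)) :
    List (String × String × String × String) :=
  ((entriesB rules).filter (fun e => p e.1)).flatMap (fun e => e.2)

def build_block_sets_alt (rules : List (String × Int × Int × String × Option String)) :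
    List (String × List (String × String × String × String)) :=
  [("normal", selB (fun zb => zb == none) rules),
   ("nx", selB (fun zb => zb == none || zb == some "x") rules),
   ("ny", selB (fun zb => zb == none || zb != some "x") rules),
   ("zero", selB (fun _ => true) rules)]

-- ===== PRECONDITION & SPEC =====
-- Pre_ excludes exactly the rules on which decompose_atomic raises ValueError:
-- displacements other than (0,0) and the four single-axis unit steps.
def Pre_build_block_sets (rules : List (String × Int × Int × String × Option String)) : Prop :=
  ∀ r ∈ rules, (r.2.1 = 0 ∧ r.2.2.1 = 0) ∨ (r.2.1 = -1 ∧ r.2.2.1 = 0) ∨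
    (r.2.1 = 1 ∧ r.2.2.1 = 0) ∨ (r.2.1 = 0 ∧ r.2.2.1 = -1) ∨ (r.2.1 = 0 ∧ r.2.2.1 = 1)
instance (rules : List (String × Int × Int × String × Option String)) : Decidable (Pre_build_block_sets rules) := by unfold Pre_build_block_sets; infer_instance

def pvWitness_build_block_sets : (List (String × Int × Int × String × Option String)) :=
  [("a", 0, 0, "b", none), ("c", 1, 0, "d", some "x"), ("e", 0, -1, "f", some "y")]

def Spec_build_block_sets (rules : List (String × Int × Int × String × Option String)) (out : List (String × List (String × String × String × String))) : Prop := out = build_block_sets_alt rules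
instance (rules : List (String × Int × Int × String × Option String)) (out : List (String × List (String × String × String × String))) : Decidable (Spec_build_block_sets rules out) := by unfold Spec_build_block_sets; infer_instance

-- ===== CLAIM (what is proved, stated in full; the proofs are below) =====
def Claim_equal_build_block_sets : Prop := ∀ (rules : List (String × Int × Int × String × Option String)), Dom_build_block_sets rules → Pre_build_block_sets rules → Spec_build_block_sets rules (build_block_sets rules)

-- ===== LEMMAS AND PROOFS =====

-- On every displacement Pre_ admits, both decompositions succeed and B's flat list
-- is A's src_port followed by its optional dst_port.
lemma decomp_flat (s d : String) (dx dy : Int)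
    (h : (dx = 0 ∧ dy = 0) ∨ (dx = -1 ∧ dy = 0) ∨ (dx = 1 ∧ dy = 0) ∨
         (dx = 0 ∧ dy = -1) ∨ (dx = 0 ∧ dy = 1)) :
    ∃ sp dp, decompose_atomic s dx dy d = some (sp, dp) ∧
      flat_ports s dx dy d = some (sp :: (match dp with | none => [] | some p => [p])) := by
  rcases h with ⟨h1, h2⟩ | ⟨h1, h2⟩ | ⟨h1, h2⟩ | ⟨h1, h2⟩ | ⟨h1, h2⟩ <;> subst h1 <;> subst h2
  · exact ⟨("C", s, "C", d), none, by norm_num [decompose_atomic], by norm_num [flat_ports]⟩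
  · exact ⟨("C", s, "W", d), some ("E", d, "C", d), by norm_num [decompose_atomic],
      by norm_num [flat_ports, List.lookup, BEq.beq]⟩
  · exact ⟨("C", s, "E", d), some ("W", d, "C", d), by norm_num [decompose_atomic],
      by norm_num [flat_ports, List.lookup, BEq.beq]⟩
  · exact ⟨("C", s, "S", d), some ("N", d, "C", d), by norm_num [decompose_atomic],
      by norm_num [flat_ports, List.lookup, BEq.beq]⟩
  · exact ⟨("C", s, "N", d), some ("S", d, "C", d), by norm_num [decompose_atomic],
      by norm_num [flat_ports, List.lookup, BEq.beq]⟩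

lemma selB_cons (p : Option String → Bool) (s d : String) (dx dy : Int) (zb : Option String)
    (rs : List (String × Int × Int × String × Option String))
    (fp : List (String × String × String × String)) (hf : flat_ports s dx dy d = some fp) :
    selB p ((s, dx, dy, d, zb) :: rs) = (if p zb then fp else []) ++ selB p rs := by
  simp only [selB, entriesB, hf, List.filter_cons]
  by_cases h : p zb <;> simp [h]

lemma buildLoopA_eq (rules : List (String × Int × Int × String × Option String))
    (hp : Pre_build_block_sets rules)
    (n x y z : List (String × String × String × String)) :
    buildLoopA rules n x y z =
      [("normal", n ++ selB (fun zb => zb == none) rules),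
       ("nx", x ++ selB (fun zb => zb == none || zb == some "x") rules),
       ("ny", y ++ selB (fun zb => zb == none || zb != some "x") rules),
       ("zero", z ++ selB (fun _ => true) rules)] := by
  induction rules generalizing n x y z with
  | nil => simp [buildLoopA, selB, entriesB]
  | cons r rs ih =>
    obtain ⟨s, dx, dy, d, zb⟩ := r
    have hr := hp _ (List.mem_cons_self ..)
    obtain ⟨sp, dp, hA, hB⟩ := decomp_flat s d dx dy hr
    have hrs : Pre_build_block_sets rs := fun r hr => hp r (List.mem_cons_of_mem _ hr)
    have h1 := selB_cons (fun zb => zb == none) s d dx dy zb rs _ hB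
    have h2 := selB_cons (fun zb => zb == none || zb == some "x") s d dx dy zb rs _ hB
    have h3 := selB_cons (fun zb => zb == none || zb != some "x") s d dx dy zb rs _ hB
    have h4 := selB_cons (fun _ => true) s d dx dy zb rs _ hB
    rw [buildLoopA, hA]
    dsimp only
    rcases zb with _ | t
    · rw [ih hrs]
      rw [h1, h2, h3, h4]
      simp [List.append_assoc]
    · by_cases ht : t = "x"
      · subst ht
        dsimp only
        rw [if_pos rfl, ih hrs, h1, h2, h3, h4]
        simp [List.append_assoc]
      · dsimp only
        rw [if_neg ht, ih hrs, h1, h2, h3, h4]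
        have hne : (some t != some "x") = true := by simpa using ht
        simp [List.append_assoc, ht, hne]

-- ===== VERDICT (by name: the statement is the Claim_ definition above) =====
theorem build_block_sets_spec : Claim_equal_build_block_sets := by
  intro rules _ hp
  unfold Spec_build_block_sets build_block_sets build_block_sets_alt
  simpa using buildLoopA_eq rules hp [] [] [] []
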